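-- pv_equiv track=rewrite | github.com/hogan-tech/leetcode-solution | 3963-number-of-perfect-pairs/3963-number-of-perfect-pairs.py | perfectPairs
-- ===== SOURCE A (Python) =====
-- import bisect
-- from typing import List
--
-- def perfectPairs(nums: List[int]) -> int:
--     sortedAbs = sorted([abs(num) for num in nums])
--     n = len(sortedAbs)
--     result = 0
--     for i in range(n):
--         x = sortedAbs[i]
--         maxY = 2 * x
--         j = bisect.bisect_right(sortedAbs, maxY, i+1) - 1
--         if j >= i + 1:
--             result += j - i
--     return result
-- ===== SOURCE B (Python) =====
-- from typing import List
--
-- def perfectPairs(nums: List[int]) -> int: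
--     # two-pointer sweep over the sorted absolute values instead of a per-element binary search
--     s = sorted(abs(v) for v in nums)
--     left = 0
--     result = 0
--     for right in range(len(s)):
--         while 2 * s[left] < s[right]:
--             left += 1
--         result += right - left
--     return result
-- ===== Notes on version B (the rewrite author's own statement) =====
-- stated objective: faster
-- what changed: Replaces the per-element bisect_right binary search with a single two-pointer sliding-window sweep over the sorted absolute values.
import Mathlib
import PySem

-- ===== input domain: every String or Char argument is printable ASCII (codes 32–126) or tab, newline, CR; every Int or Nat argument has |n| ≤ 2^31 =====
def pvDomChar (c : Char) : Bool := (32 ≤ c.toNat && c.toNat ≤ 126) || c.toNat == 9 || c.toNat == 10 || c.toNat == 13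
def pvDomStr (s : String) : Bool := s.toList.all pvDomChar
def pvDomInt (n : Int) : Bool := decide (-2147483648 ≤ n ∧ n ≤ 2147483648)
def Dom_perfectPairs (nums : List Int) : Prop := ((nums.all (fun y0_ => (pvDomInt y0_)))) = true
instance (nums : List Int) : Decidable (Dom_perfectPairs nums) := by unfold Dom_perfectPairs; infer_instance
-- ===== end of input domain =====

-- B replaces A's per-element bisect_right binary search with a single two-pointer sweep over the same sorted list.

-- ===== PORT A =====
-- hand port of bisect.bisect_right(a, x, lo, hi) (CPython's loop, exact on Nat bounds lo ≤ hi ≤ len a)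
def bisectFrom (a : List Int) (x : Int) (lo hi : Nat) : Nat :=
  if _h : lo < hi then
    let mid := (lo + hi) / 2
    if x < a.getD mid 0 then bisectFrom a x lo mid
    else bisectFrom a x (mid + 1) hi
  else lo
termination_by hi - lo
decreasing_by all_goals omega

def perfectPairs (nums : List Int) : Int :=
  let sortedAbs := PySem.List.sorted (nums.map (fun num => |num|)) (fun v => v)
  let n := sortedAbs.length
  (List.range n).foldl (fun result i =>
    let x := sortedAbs.getD i 0
    let maxY := 2 * x
    let j : Int := (bisectFrom sortedAbs maxY (i + 1) n : Int) - 1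
    if (i : Int) + 1 ≤ j then result + (j - (i : Int)) else result) 0

-- ===== PORT B =====
-- the inner 'while 2*s[left] < s[right]: left += 1' (the 'left < s.length' test only makes the recursion total;
-- Python's loop never reaches it because it stops at left = right)
def advanceLeft (s : List Int) (x : Int) (left : Nat) : Nat :=
  if left < s.length ∧ 2 * s.getD left 0 < x then advanceLeft s x (left + 1) else left
termination_by s.length - left
decreasing_by omega

def perfectPairs_alt (nums : List Int) : Int :=
  let s := PySem.List.sorted (nums.map (fun v => |v|)) (fun v => v)
  let st := (List.range s.length).foldl (fun (st : Nat × Int) right =>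
      let left := advanceLeft s (s.getD right 0) st.1
      (left, st.2 + ((right : Int) - (left : Int)))) (0, 0)
  st.2

-- ===== PRECONDITION & SPEC =====
def Spec_perfectPairs (nums : List Int) (out : Int) : Prop := out = perfectPairs_alt nums
instance (nums : List Int) (out : Int) : Decidable (Spec_perfectPairs nums out) := by unfold Spec_perfectPairs; infer_instance

-- ===== CLAIM (what is proved, stated in full; the proofs are below) =====
def Claim_equal_perfectPairs : Prop := ∀ (nums : List Int), Dom_perfectPairs nums → Spec_perfectPairs nums (perfectPairs nums)

-- ===== LEMMAS AND PROOFS =====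

-- per-index count of partners to the right (A's view) and to the left (B's view)
def pvF (s : List Int) (i : Nat) : Nat :=
  ((Finset.range s.length).filter (fun j => i < j ∧ s.getD j 0 ≤ 2 * s.getD i 0)).card
def pvG (s : List Int) (r : Nat) : Nat :=
  ((Finset.range r).filter (fun l => s.getD r 0 ≤ 2 * s.getD l 0)).card

lemma sorted_mono (nums : List Int) :
    ∀ k l, k ≤ l → l < (PySem.List.sorted (nums.map (fun v => |v|)) (fun v => v)).length →
      (PySem.List.sorted (nums.map (fun v => |v|)) (fun v => v)).getD k 0 ≤
      (PySem.List.sorted (nums.map (fun v => |v|)) (fun v => v)).getD l 0 := by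
  intro k l hkl hl
  have hp := PySem.List.sorted_pairwise (nums.map (fun v => |v|)) (fun v => v)
  rw [List.pairwise_iff_getElem] at hp
  rcases Nat.eq_or_lt_of_le hkl with h | h
  · subst h; exact le_refl _
  · have hk : k < (PySem.List.sorted (nums.map (fun v => |v|)) (fun v => v)).length := lt_trans h hl
    rw [List.getD_eq_getElem _ _ hk, List.getD_eq_getElem _ _ hl]
    exact hp k l hk hl h

lemma sorted_nonneg (nums : List Int) :
    ∀ k, k < (PySem.List.sorted (nums.map (fun v => |v|)) (fun v => v)).length →
      0 ≤ (PySem.List.sorted (nums.map (fun v => |v|)) (fun v => v)).getD k 0 := by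
  intro k hk
  rw [List.getD_eq_getElem _ _ hk]
  have hmem := List.getElem_mem hk
  rw [PySem.List.mem_sorted] at hmem
  obtain ⟨v, _, hv⟩ := List.mem_map.1 hmem
  rw [← hv]
  exact abs_nonneg v

lemma bisectFrom_spec (s : List Int) (x : Int)
    (hmono : ∀ k l, k ≤ l → l < s.length → s.getD k 0 ≤ s.getD l 0) :
    ∀ d lo hi, hi - lo ≤ d → lo ≤ hi → hi ≤ s.length →
      lo ≤ bisectFrom s x lo hi ∧ bisectFrom s x lo hi ≤ hi ∧
      (∀ k, lo ≤ k → k < bisectFrom s x lo hi → s.getD k 0 ≤ x) ∧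
      (∀ k, bisectFrom s x lo hi ≤ k → k < hi → x < s.getD k 0) := by
  intro d
  induction d with
  | zero =>
    intro lo hi h1 h2 h3
    have heq : ¬ lo < hi := by omega
    rw [bisectFrom]; simp only [heq, dite_false]
    exact ⟨le_refl _, h2, fun k hk1 hk2 => absurd hk2 (by omega), fun k hk1 hk2 => absurd hk2 (by omega)⟩
  | succ d ih =>
    intro lo hi h1 h2 h3
    by_cases hlt : lo < hi
    · rw [bisectFrom]; simp only [hlt, dite_true]
      have hm1 : lo ≤ (lo + hi) / 2 := by omega
      have hm2 : (lo + hi) / 2 < hi := by omega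
      by_cases hx : x < s.getD ((lo + hi) / 2) 0
      · simp only [hx, if_true]
        obtain ⟨p1, p2, p3, p4⟩ := ih lo ((lo + hi) / 2) (by omega) hm1 (by omega)
        refine ⟨p1, by omega, p3, fun k hk1 hk2 => ?_⟩
        by_cases hk : k < (lo + hi) / 2
        · exact p4 k hk1 hk
        · exact lt_of_lt_of_le hx (hmono _ k (by omega) (by omega))
      · simp only [hx, if_false]
        obtain ⟨p1, p2, p3, p4⟩ := ih ((lo + hi) / 2 + 1) hi (by omega) (by omega) h3
        refine ⟨by omega, p2, fun k hk1 hk2 => ?_, p4⟩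
        by_cases hk : (lo + hi) / 2 + 1 ≤ k
        · exact p3 k hk hk2
        · exact le_trans (hmono k ((lo + hi) / 2) (by omega) (by omega)) (not_lt.1 hx)
    · have heq : ¬ lo < hi := hlt
      rw [bisectFrom]; simp only [heq, dite_false]
      exact ⟨le_refl _, h2, fun k hk1 hk2 => absurd hk2 (by omega), fun k hk1 hk2 => absurd hk2 (by omega)⟩

lemma advanceLeft_spec (s : List Int) (x : Int) :
    ∀ d left, s.length - left ≤ d →
      left ≤ advanceLeft s x left ∧
      (∀ k, left ≤ k → k < advanceLeft s x left → k < s.length ∧ 2 * s.getD k 0 < x) ∧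
      ¬ (advanceLeft s x left < s.length ∧ 2 * s.getD (advanceLeft s x left) 0 < x) := by
  intro d
  induction d with
  | zero =>
    intro left h
    have hc : ¬ (left < s.length ∧ 2 * s.getD left 0 < x) := by
      intro hc; omega
    rw [advanceLeft, if_neg hc]
    exact ⟨le_refl _, fun k hk1 hk2 => absurd hk2 (by omega), hc⟩
  | succ d ih =>
    intro left h
    by_cases hc : left < s.length ∧ 2 * s.getD left 0 < x
    · rw [advanceLeft, if_pos hc]
      obtain ⟨p1, p2, p3⟩ := ih (left + 1) (by omega)
      refine ⟨by omega, fun k hk1 hk2 => ?_, p3⟩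
      rcases Nat.eq_or_lt_of_le hk1 with hk | hk
      · exact hk ▸ hc
      · exact p2 k hk hk2
    · rw [advanceLeft, if_neg hc]
      exact ⟨le_refl _, fun k hk1 hk2 => absurd hk2 (by omega), hc⟩

lemma foldl_eq_sum (body : Int → Nat → Int) (g : Nat → Int) :
    ∀ n : Nat, (∀ acc i, i < n → body acc i = acc + g i) →
      (List.range n).foldl body 0 = ∑ i ∈ Finset.range n, g i := by
  intro n
  induction n with
  | zero => intro _; simp
  | succ n ih =>
    intro h
    rw [List.range_succ, List.foldl_append, Finset.sum_range_succ,
        ih (fun acc i hi => h acc i (by omega))]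
    simp [h _ n (by omega)]

def tpFold (s : List Int) (m : Nat) : Nat × Int :=
  (List.range m).foldl (fun (st : Nat × Int) right =>
      let left := advanceLeft s (s.getD right 0) st.1
      (left, st.2 + ((right : Int) - (left : Int)))) (0, 0)

lemma tp_inv (s : List Int)
    (hmono : ∀ k l, k ≤ l → l < s.length → s.getD k 0 ≤ s.getD l 0)
    (hnn : ∀ k, k < s.length → 0 ≤ s.getD k 0) :
    ∀ m, m ≤ s.length →
      (tpFold s m).1 ≤ m ∧
      (∀ k, k < (tpFold s m).1 → ∀ j, m ≤ j → j < s.length → 2 * s.getD k 0 < s.getD j 0) ∧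
      (tpFold s m).2 = ∑ r ∈ Finset.range m, (pvG s r : Int) := by
  intro m
  induction m with
  | zero =>
    intro _
    refine ⟨le_refl _, fun k hk => absurd hk (by simp [tpFold]), by simp [tpFold]⟩
  | succ m ih =>
    intro hm
    have hmn : m < s.length := hm
    obtain ⟨q1, q2, q3⟩ := ih (by omega)
    have hstep : tpFold s (m + 1) =
        (advanceLeft s (s.getD m 0) (tpFold s m).1,
         (tpFold s m).2 + ((m : Int) - (advanceLeft s (s.getD m 0) (tpFold s m).1 : Int))) := by
      rw [tpFold, List.range_succ, List.foldl_append]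
      rfl
    obtain ⟨a1, a2, a3⟩ := advanceLeft_spec s (s.getD m 0) s.length (tpFold s m).1 (by omega)
    have hLm : advanceLeft s (s.getD m 0) (tpFold s m).1 ≤ m := by
      by_contra h
      have h2 := a2 m (by omega) (by omega)
      have h3 := hnn m hmn
      omega
    refine ⟨by rw [hstep]; omega, ?_, ?_⟩
    · rw [hstep]
      intro k hk j hj1 hj2
      by_cases hkL0 : k < (tpFold s m).1
      · exact q2 k hkL0 j (by omega) hj2
      · have hlt := (a2 k (by omega) hk).2
        exact lt_of_lt_of_le hlt (hmono m j (by omega) hj2)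
    · have hG : pvG s m = m - advanceLeft s (s.getD m 0) (tpFold s m).1 := by
        rw [pvG]
        have hfe : (Finset.range m).filter (fun l => s.getD m 0 ≤ 2 * s.getD l 0) =
            Finset.Ico (advanceLeft s (s.getD m 0) (tpFold s m).1) m := by
          ext l
          simp only [Finset.mem_filter, Finset.mem_range, Finset.mem_Ico]
          constructor
          · rintro ⟨hlm, hP⟩
            refine ⟨?_, hlm⟩
            by_contra h
            by_cases hlL0 : l < (tpFold s m).1
            · have := q2 l hlL0 m (le_refl m) hmn; omega
            · have := (a2 l (by omega) (by omega)).2; omega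
          · rintro ⟨hLl, hlm⟩
            refine ⟨hlm, ?_⟩
            have hLlen : advanceLeft s (s.getD m 0) (tpFold s m).1 < s.length := by omega
            have hxL : ¬ (2 * s.getD (advanceLeft s (s.getD m 0) (tpFold s m).1) 0 < s.getD m 0) :=
              fun h => a3 ⟨hLlen, h⟩
            have := hmono (advanceLeft s (s.getD m 0) (tpFold s m).1) l hLl (by omega)
            omega
        rw [hfe, Nat.card_Ico]
      rw [hstep]
      simp only []
      rw [Finset.sum_range_succ, q3]
      have : (pvG s m : Int) = (m : Int) - (advanceLeft s (s.getD m 0) (tpFold s m).1 : Int) := by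
        omega
      omega

lemma A_eq_sumF (nums : List Int) :
    perfectPairs nums =
      ∑ i ∈ Finset.range (PySem.List.sorted (nums.map (fun v => |v|)) (fun v => v)).length,
        (pvF (PySem.List.sorted (nums.map (fun v => |v|)) (fun v => v)) i : Int) := by
  have hmono := sorted_mono nums
  unfold perfectPairs
  dsimp only
  apply foldl_eq_sum
  intro acc i hi
  obtain ⟨p1, p2, p3, p4⟩ := bisectFrom_spec
    (PySem.List.sorted (nums.map (fun v => |v|)) (fun v => v))
    (2 * (PySem.List.sorted (nums.map (fun v => |v|)) (fun v => v)).getD i 0) hmono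
    (PySem.List.sorted (nums.map (fun v => |v|)) (fun v => v)).length
    (i + 1) (PySem.List.sorted (nums.map (fun v => |v|)) (fun v => v)).length
    (by omega) (by omega) (le_refl _)
  have hfilter : (Finset.range (PySem.List.sorted (nums.map (fun v => |v|)) (fun v => v)).length).filter
      (fun j => i < j ∧ (PySem.List.sorted (nums.map (fun v => |v|)) (fun v => v)).getD j 0 ≤
        2 * (PySem.List.sorted (nums.map (fun v => |v|)) (fun v => v)).getD i 0) =
      Finset.Ioo i (bisectFrom (PySem.List.sorted (nums.map (fun v => |v|)) (fun v => v))
        (2 * (PySem.List.sorted (nums.map (fun v => |v|)) (fun v => v)).getD i 0) (i + 1)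
        (PySem.List.sorted (nums.map (fun v => |v|)) (fun v => v)).length) := by
    ext j
    simp only [Finset.mem_filter, Finset.mem_range, Finset.mem_Ioo]
    constructor
    · rintro ⟨hjn, hij, hP⟩
      refine ⟨hij, ?_⟩
      by_contra h
      have := p4 j (by omega) hjn
      omega
    · rintro ⟨hij, hjr⟩
      exact ⟨by omega, hij, p3 j (by omega) hjr⟩
  have hcard : pvF (PySem.List.sorted (nums.map (fun v => |v|)) (fun v => v)) i =
      bisectFrom (PySem.List.sorted (nums.map (fun v => |v|)) (fun v => v))
        (2 * (PySem.List.sorted (nums.map (fun v => |v|)) (fun v => v)).getD i 0) (i + 1)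
        (PySem.List.sorted (nums.map (fun v => |v|)) (fun v => v)).length - i - 1 := by
    rw [pvF, hfilter, Nat.card_Ioo]
  rw [hcard]
  split_ifs with hc <;> omega

lemma B_eq_sumG (nums : List Int) :
    perfectPairs_alt nums =
      ∑ r ∈ Finset.range (PySem.List.sorted (nums.map (fun v => |v|)) (fun v => v)).length,
        (pvG (PySem.List.sorted (nums.map (fun v => |v|)) (fun v => v)) r : Int) := by
  have h := tp_inv _ (sorted_mono nums) (sorted_nonneg nums)
    (PySem.List.sorted (nums.map (fun v => |v|)) (fun v => v)).length (le_refl _)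
  rw [show perfectPairs_alt nums =
      (tpFold (PySem.List.sorted (nums.map (fun v => |v|)) (fun v => v))
        (PySem.List.sorted (nums.map (fun v => |v|)) (fun v => v)).length).2 from rfl]
  exact h.2.2

lemma sumF_eq_sumG (s : List Int) :
    ∑ i ∈ Finset.range s.length, (pvF s i : Int) = ∑ r ∈ Finset.range s.length, (pvG s r : Int) := by
  have h : ∑ i ∈ Finset.range s.length, pvF s i = ∑ r ∈ Finset.range s.length, pvG s r := by
    unfold pvF pvG
    simp only [Finset.card_filter]
    rw [Finset.sum_comm]
    apply Finset.sum_congr rfl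
    intro j hj
    rw [Finset.mem_range] at hj
    have step : ∀ i ∈ Finset.range s.length,
        (if i < j ∧ s.getD j 0 ≤ 2 * s.getD i 0 then 1 else 0) =
        (if i ∈ Finset.range j then (if s.getD j 0 ≤ 2 * s.getD i 0 then 1 else 0) else 0) := by
      intro i _
      simp only [Finset.mem_range]
      split_ifs <;> tauto
    rw [Finset.sum_congr rfl step, Finset.sum_ite_mem]
    have hint : Finset.range s.length ∩ Finset.range j = Finset.range j := by
      ext t
      simp only [Finset.mem_inter, Finset.mem_range]
      omega
    rw [hint]
  rw [← Nat.cast_sum, ← Nat.cast_sum, h]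

-- ===== VERDICT (by name: the statement is the Claim_ definition above) =====
theorem perfectPairs_spec : Claim_equal_perfectPairs := by
  intro nums _
  unfold Spec_perfectPairs
  rw [A_eq_sumF, B_eq_sumG, sumF_eq_sumG]
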